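-- pv_equiv track=rewrite | github.com/klevt33/AIProcessor | matching_scores.py | are_unspsc_compatible
-- ===== SOURCE A (Python) =====
-- def are_unspsc_compatible(unspsc1: str, unspsc2: str) -> bool:
--     """
--     Checks if two UNSPSC (United Nations Standard Products and Services Code)
--     values are compatible.
--
--     Compatibility is defined as:
--     1. They share a common prefix of non-zero digits.
--     2. After this common prefix, if they differ, the differing digits must lead to
--        one UNSPSC code having only zeros for the rest of its length, while the other
--        continues or also has zeros.
--     3. If digits differ and neither is '0' at the first point of difference, they
--        are considered incompatible.
--
--     Example:
--         "44121706" and "44120000" are compatible (common prefix "4412", then one has "1706", other has "0000").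
--         "42000000" and "44000000" are not compatible (differ at the second digit, neither is '0').
--         "12345678" and "12340000" are compatible.
--         "12345000" and "12340000" are compatible (common prefix "1234").
--
--     Args:
--         unspsc1 (str): The first UNSPSC code string.
--         unspsc2 (str): The second UNSPSC code string.
--
--     Returns:
--         bool: True if the UNSPSC codes are compatible, False otherwise.
--     """
--     # Convert to strings if they're not already
--     unspsc1 = str(unspsc1)
--     unspsc2 = str(unspsc2)
--
--     # Get the common prefix (before the first different character)
--     common_prefix_len = 0
--     for i in range(min(len(unspsc1), len(unspsc2))):
--         if unspsc1[i] == unspsc2[i]: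
--             common_prefix_len += 1
--         elif unspsc1[i] != "0" and unspsc2[i] != "0":
--             # Different non-zero digits means incompatible
--             return False
--         else:
--             break
--
--     # Check if the remaining characters in both strings are all zeros
--     suffix1 = unspsc1[common_prefix_len:]
--     suffix2 = unspsc2[common_prefix_len:]
--
--     return all(c == "0" for c in suffix1) or all(c == "0" for c in suffix2)
-- ===== SOURCE B (Python) =====
-- def are_unspsc_compatible(unspsc1: str, unspsc2: str) -> bool:
--     # Normalize each code by stripping trailing zeros; codes are compatible
--     # exactly when one normalized form is a prefix of the other.
--     sa = str(unspsc1).rstrip("0")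
--     sb = str(unspsc2).rstrip("0")
--     return sa.startswith(sb) or sb.startswith(sa)
-- ===== Notes on version B (the rewrite author's own statement) =====
-- stated objective: simpler
-- what changed: Replaces the explicit first-difference scan with its early-return branch and the two all-zeros suffix checks by normalizing both codes with rstrip('0') and testing symmetric prefix containment.
import Mathlib
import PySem

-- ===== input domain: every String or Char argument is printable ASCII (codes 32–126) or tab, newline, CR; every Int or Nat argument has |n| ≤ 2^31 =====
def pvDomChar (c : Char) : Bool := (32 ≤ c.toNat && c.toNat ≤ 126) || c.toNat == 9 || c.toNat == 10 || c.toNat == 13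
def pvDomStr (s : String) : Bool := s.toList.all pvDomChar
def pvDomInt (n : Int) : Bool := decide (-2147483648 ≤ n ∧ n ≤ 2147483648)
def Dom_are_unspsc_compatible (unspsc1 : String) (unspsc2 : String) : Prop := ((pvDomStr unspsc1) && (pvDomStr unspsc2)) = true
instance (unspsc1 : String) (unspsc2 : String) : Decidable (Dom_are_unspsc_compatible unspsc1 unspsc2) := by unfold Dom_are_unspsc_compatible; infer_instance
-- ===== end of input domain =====

-- B normalizes both codes by stripping trailing zeros and tests symmetric prefix
-- containment, replacing A's first-difference scan and all-zeros suffix loops (simpler).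


-- ===== PORT A =====
-- `all(c == "0" for c in s)`
def pvAllZero (l : List Char) : Bool := l.all (· == '0')

-- the `for i in range(min(len, len))` loop over both strings in lockstep:
-- `none` = the early `return False`, `some k` = the final common_prefix_len
def pvScan : List Char → List Char → Option Nat
  | a :: as, b :: bs =>
      if a == b then (pvScan as bs).map (· + 1)
      else if a != '0' && b != '0' then none
      else some 0
  | _, _ => some 0

def are_unspsc_compatible (unspsc1 : String) (unspsc2 : String) : Bool :=
  -- str() on a str argument is the identity
  let l1 := unspsc1.toList
  let l2 := unspsc2.toList
  match pvScan l1 l2 with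
  | none => false
  | some k => pvAllZero (l1.drop k) || pvAllZero (l2.drop k)
  -- s[k:] with 0 ≤ k is List.drop k (exact)

-- ===== PORT B =====
-- s.rstrip("0") ported by hand (PySem has no char-set rstrip): drop the
-- trailing run of '0' characters — exact on all strings
def pvRstrip0 (l : List Char) : List Char := (l.reverse.dropWhile (· == '0')).reverse

def are_unspsc_compatible_alt (unspsc1 : String) (unspsc2 : String) : Bool :=
  let sa := pvRstrip0 unspsc1.toList
  let sb := pvRstrip0 unspsc2.toList
  -- x.startswith(y) is y.isPrefixOf x (exact)
  sb.isPrefixOf sa || sa.isPrefixOf sb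

-- ===== PRECONDITION & SPEC =====
def Spec_are_unspsc_compatible (unspsc1 : String) (unspsc2 : String) (out : Bool) : Prop := out = are_unspsc_compatible_alt unspsc1 unspsc2
instance (unspsc1 : String) (unspsc2 : String) (out : Bool) : Decidable (Spec_are_unspsc_compatible unspsc1 unspsc2 out) := by unfold Spec_are_unspsc_compatible; infer_instance

-- ===== CLAIM (what is proved, stated in full; the proofs are below) =====
def Claim_equal_are_unspsc_compatible : Prop := ∀ (unspsc1 : String) (unspsc2 : String), Dom_are_unspsc_compatible unspsc1 unspsc2 → Spec_are_unspsc_compatible unspsc1 unspsc2 (are_unspsc_compatible unspsc1 unspsc2)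

-- ===== LEMMAS AND PROOFS =====

-- A with the post-loop suffix check fused into the scan recursion
def pvAfun : List Char → List Char → Bool
  | a :: as, b :: bs =>
      if a == b then pvAfun as bs
      else if a != '0' && b != '0' then false
      else pvAllZero (a :: as) || pvAllZero (b :: bs)
  | l1, l2 => pvAllZero l1 || pvAllZero l2

theorem pvScan_eq_pvAfun (l1 l2 : List Char) :
    (match pvScan l1 l2 with
      | none => false
      | some k => pvAllZero (l1.drop k) || pvAllZero (l2.drop k)) = pvAfun l1 l2 := by
  induction l1 generalizing l2 with
  | nil => cases l2 <;> simp [pvScan, pvAfun]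
  | cons a as ih =>
    cases l2 with
    | nil => simp [pvScan, pvAfun, pvAllZero]
    | cons b bs =>
      by_cases hab : a = b
      · subst hab
        simp only [pvScan, pvAfun, beq_self_eq_true, if_true]
        cases h : pvScan as bs with
        | none => simpa [h] using (h ▸ ih bs :)
        | some k => simpa [h, List.drop_succ_cons] using (h ▸ ih bs :)
      · have hab' : (a == b) = false := by simp [hab]
        simp only [pvScan, pvAfun, hab', if_false]
        by_cases hz : a != '0' && b != '0' <;> simp [hz]

theorem pvRstrip0_eq_nil (l : List Char) : pvRstrip0 l = [] ↔ pvAllZero l = true := by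
  simp [pvRstrip0, pvAllZero, List.dropWhile_eq_nil_iff, List.all_eq_true]

theorem pvRstrip0_cons (a : Char) (as : List Char) :
    pvRstrip0 (a :: as) =
      if pvRstrip0 as = [] then (if a == '0' then [] else [a]) else a :: pvRstrip0 as := by
  simp only [pvRstrip0, List.reverse_cons, List.dropWhile_append, List.reverse_eq_nil_iff]
  by_cases h : (as.reverse.dropWhile (· == '0')).isEmpty
  · rw [if_pos h, if_pos (by simpa [List.isEmpty_iff] using h)]
    by_cases ha : a = '0'
    · have hb : (a == '0') = true := by simp [ha]
      simp [List.dropWhile, hb]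
    · have hb : (a == '0') = false := by simp [ha]
      simp [List.dropWhile, hb]
  · rw [if_neg h, if_neg (by simpa [List.isEmpty_iff] using h)]
    simp

theorem pvAfun_eq_prefix (l1 l2 : List Char) :
    pvAfun l1 l2 =
      ((pvRstrip0 l2).isPrefixOf (pvRstrip0 l1) || (pvRstrip0 l1).isPrefixOf (pvRstrip0 l2)) := by
  induction l1 generalizing l2 with
  | nil =>
    cases l2 <;> simp [pvAfun, pvAllZero, pvRstrip0, List.isPrefixOf]
  | cons a as ih =>
    cases l2 with
    | nil => simp [pvAfun, pvAllZero, pvRstrip0, List.isPrefixOf]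
    | cons b bs =>
      rw [pvRstrip0_cons a as, pvRstrip0_cons b bs]
      by_cases hab : a = b
      · subst hab
        simp only [pvAfun, beq_self_eq_true, if_true]
        rw [ih bs]
        by_cases h1 : pvRstrip0 as = [] <;> by_cases h2 : pvRstrip0 bs = [] <;>
          · simp only [h1, h2, if_true, if_false, if_pos, if_neg]
            by_cases ha : a = '0' <;> cases h1' : pvRstrip0 as <;> cases h2' : pvRstrip0 bs <;>
              simp_all [List.isPrefixOf]
      · have hab' : (a == b) = false := by simp [hab]
        simp only [pvAfun, hab', if_false]
        by_cases hz : a != '0' && b != '0'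
      -- both heads nonzero: incompatible, and both normalized forms start with a ≠ b
        · have ha : ¬ a = '0' := by simp [bne] at hz; intro h; simp [h] at hz
          have hb : ¬ b = '0' := by simp [bne] at hz; exact fun h => absurd (hz.2) (by simp [h])
          simp only [hz, if_true]
          by_cases h1 : pvRstrip0 as = [] <;> by_cases h2 : pvRstrip0 bs = [] <;>
            simp [h1, h2, ha, hb, List.isPrefixOf, hab', (by simpa [eq_comm] using hab : ¬ b = a)]
        · simp only [hz, if_false]
          have hza : a = '0' ∨ b = '0' := by
            by_contra h
            push_neg at h
            simp [bne, h.1, h.2] at hz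
          rcases hza with hza | hzb
          · -- a = '0', so b ≠ '0'
            have hb : ¬ b = '0' := fun h => hab (hza.trans h.symm)
            have hb1 : (b == '0') = false := by simp [hb]
            have hb2 : (('0' : Char) == b) = false := by rw [beq_eq_false_iff_ne]; exact fun h => hb h.symm
            subst hza
            have hzb2 : pvAllZero (b :: bs) = false := by simp [pvAllZero, List.all_cons, hb1]
            rw [hzb2, Bool.or_false]
            by_cases h1 : pvRstrip0 as = []
            · have hz1 : (as.all (· == '0')) = true := by
                simpa [pvAllZero] using (pvRstrip0_eq_nil as).mp h1
              by_cases h2 : pvRstrip0 bs = [] <;>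
                simp [h1, h2, hz1, pvAllZero, List.all_cons, List.isPrefixOf]
            · have hz1 : pvAllZero as = false := by
                cases hpv : pvAllZero as with
                | false => rfl
                | true => exact absurd ((pvRstrip0_eq_nil as).mpr hpv) h1
              have hz1' : (as.all (· == '0')) = false := by simpa [pvAllZero] using hz1
              by_cases h2 : pvRstrip0 bs = [] <;>
                simp [h1, h2, hz1', pvAllZero, List.all_cons, List.isPrefixOf, hb1, hb2]
          · -- b = '0', so a ≠ '0'
            have ha : ¬ a = '0' := fun h => hab (h.trans hzb.symm)
            have ha1 : (a == '0') = false := by simp [ha]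
            have ha2 : (('0' : Char) == a) = false := by rw [beq_eq_false_iff_ne]; exact fun h => ha h.symm
            subst hzb
            have hza2 : pvAllZero (a :: as) = false := by simp [pvAllZero, List.all_cons, ha1]
            rw [hza2, Bool.false_or]
            by_cases h2 : pvRstrip0 bs = []
            · have hz2 : (bs.all (· == '0')) = true := by
                simpa [pvAllZero] using (pvRstrip0_eq_nil bs).mp h2
              by_cases h1 : pvRstrip0 as = [] <;>
                simp [h1, h2, hz2, pvAllZero, List.all_cons, List.isPrefixOf]
            · have hz2 : pvAllZero bs = false := by
                cases hpv : pvAllZero bs with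
                | false => rfl
                | true => exact absurd ((pvRstrip0_eq_nil bs).mpr hpv) h2
              have hz2' : (bs.all (· == '0')) = false := by simpa [pvAllZero] using hz2
              by_cases h1 : pvRstrip0 as = [] <;>
                simp [h1, h2, hz2', pvAllZero, List.all_cons, List.isPrefixOf, ha1, ha2]

-- ===== VERDICT (by name: the statement is the Claim_ definition above) =====
theorem are_unspsc_compatible_spec : Claim_equal_are_unspsc_compatible := by
  intro u1 u2 _
  unfold Spec_are_unspsc_compatible are_unspsc_compatible are_unspsc_compatible_alt
  rw [pvScan_eq_pvAfun, pvAfun_eq_prefix]
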